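-- pv_equiv track=rewrite | github.com/shizhenneko/Video-Transformer | src/utils/note_refiner.py | _strip_refiner_appendix_blocks
-- ===== SOURCE A (Python) =====
-- def _strip_refiner_appendix_blocks(
--     lines: list[str], refiner_headings: set[str]
-- ) -> list[str]:
--     stripped: list[str] = []
--     skipping = False
--     for line in lines:
--         line_stripped = line.strip()
--         if skipping:
--             if line_stripped.startswith("### ") or line_stripped.startswith("## "):
--                 skipping = False
--             else:
--                 continue
--         if line_stripped in refiner_headings:
--             skipping = True
--             continue
--         stripped.append(line)
--     return stripped
-- ===== SOURCE B (Python) =====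
-- def _strip_refiner_appendix_blocks(
--     lines: list[str], refiner_headings: set[str]
-- ) -> list[str]:
--     def _is_boundary(line: str) -> bool:
--         s = line.strip()
--         return s.startswith("### ") or s.startswith("## ")
--
--     n = len(lines)
--     # Pass 1 (right to left): nb[i] = index of the first markdown boundary
--     # strictly after i, or n if there is none.
--     nxt = n
--     nb_rev = []
--     for i in range(n - 1, -1, -1):
--         nb_rev.append(nxt)
--         if _is_boundary(lines[i]):
--             nxt = i
--     nb = nb_rev[::-1]
--
--     # Pass 2 (left to right): a refiner heading at i covers [i, nb[i]);
--     # keep a line iff it is not covered by any heading seen so far.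
--     out = []
--     cover = 0
--     for i, line in enumerate(lines):
--         if line.strip() in refiner_headings:
--             cover = max(cover, nb[i])
--         if cover <= i:
--             out.append(line)
--     return out
-- ===== Notes on version B (the rewrite author's own statement) =====
-- stated objective: alternative
-- what changed: Replaces A's single-pass skip-flag state machine with a two-pass interval algorithm: a right-to-left pass computes each line's next markdown-boundary index, then a left-to-right pass removes every line covered by the interval [heading index, next boundary) of a refiner heading, tracked as a running coverage maximum.
import Mathlib
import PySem

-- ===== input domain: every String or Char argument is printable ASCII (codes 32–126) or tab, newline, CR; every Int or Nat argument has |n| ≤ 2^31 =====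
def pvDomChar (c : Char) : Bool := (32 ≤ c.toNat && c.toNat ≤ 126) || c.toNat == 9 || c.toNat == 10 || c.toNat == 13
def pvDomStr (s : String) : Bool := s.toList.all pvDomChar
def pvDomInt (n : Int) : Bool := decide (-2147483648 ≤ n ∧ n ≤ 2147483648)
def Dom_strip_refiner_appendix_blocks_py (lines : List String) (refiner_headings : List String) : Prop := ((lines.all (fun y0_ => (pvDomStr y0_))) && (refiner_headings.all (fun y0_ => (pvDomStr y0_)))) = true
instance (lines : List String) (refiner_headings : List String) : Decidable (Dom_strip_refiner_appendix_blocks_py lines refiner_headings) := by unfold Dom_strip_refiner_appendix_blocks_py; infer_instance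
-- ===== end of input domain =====

-- B replaces A's one-pass skip-flag state machine by a different algorithm: a right-to-left
-- pass computing the next markdown-boundary index for every line, then a left-to-right pass
-- removing every line covered by the interval [heading, next boundary) of some refiner
-- heading (objective: alternative; same O(n) cost).

-- ===== PORT A =====
def strip_refiner_appendix_blocks_py (lines : List String) (refiner_headings : List String) : List String :=
  (lines.foldl
    (fun (acc : List String × Bool) line =>
      let ls := PySem.Str.strip line
      -- Python's 'continue's flattened: skipping ∧ not a boundary → drop the line, state unchanged
      if acc.2 && !(PySem.Str.startswith ls "### " || PySem.Str.startswith ls "## ") then acc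
      else if PySem.Set.contains refiner_headings ls then (acc.1, true)
      else (acc.1 ++ [line], false))
    ([], false)).1

-- ===== PORT B =====
-- B's helper _is_boundary
def pvIsBoundary (line : String) : Bool :=
  let s := PySem.Str.strip line
  PySem.Str.startswith s "### " || PySem.Str.startswith s "## "

-- B's pass 1: Python's `for i in range(n-1,-1,-1)` with append-to-nb_rev then nb_rev[::-1],
-- ported as the structural recursion from the right end: the same assignments are made in the
-- same (right-to-left) order, and the result list is produced directly in final (index) order.
def pvNbFold (todo : List String) (i : Int) (n : Int) : List Int × Int :=
  match todo with
  | [] => ([], n)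
  | l :: rest =>
    let r := pvNbFold rest (i + 1) n
    (r.2 :: r.1, if pvIsBoundary l then i else r.2)

def strip_refiner_appendix_blocks_py_alt (lines : List String) (refiner_headings : List String) : List String :=
  let n : Int := lines.length
  let nb : List Int := (pvNbFold lines 0 n).1
  -- B's pass 2; nb[i] is always in range, so pyGetD's default is never used
  ((PySem.List.enumerate lines).foldl
    (fun (acc : List String × Int) p =>
      let cover := if PySem.Set.contains refiner_headings (PySem.Str.strip p.2) then
                     max acc.2 (PySem.List.pyGetD nb p.1 0)
                   else acc.2
      if cover ≤ p.1 then (acc.1 ++ [p.2], cover) else (acc.1, cover))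
    ([], 0)).1

-- ===== PRECONDITION & SPEC =====
def Spec_strip_refiner_appendix_blocks_py (lines : List String) (refiner_headings : List String) (out : List String) : Prop := out = strip_refiner_appendix_blocks_py_alt lines refiner_headings
instance (lines : List String) (refiner_headings : List String) (out : List String) : Decidable (Spec_strip_refiner_appendix_blocks_py lines refiner_headings out) := by unfold Spec_strip_refiner_appendix_blocks_py; infer_instance

-- ===== CLAIM (what is proved, stated in full; the proofs are below) =====
def Claim_equal_strip_refiner_appendix_blocks_py : Prop := ∀ (lines : List String) (refiner_headings : List String), Dom_strip_refiner_appendix_blocks_py lines refiner_headings → Spec_strip_refiner_appendix_blocks_py lines refiner_headings (strip_refiner_appendix_blocks_py lines refiner_headings)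

-- ===== LEMMAS AND PROOFS =====

set_option maxHeartbeats 1000000

-- the two loop bodies, named for the proofs (identical to the lambdas in the ports)
def pvAstep (hs : List String) (acc : List String × Bool) (line : String) : List String × Bool :=
  if acc.2 && !(PySem.Str.startswith (PySem.Str.strip line) "### " || PySem.Str.startswith (PySem.Str.strip line) "## ") then acc
  else if PySem.Set.contains hs (PySem.Str.strip line) then (acc.1, true)
  else (acc.1 ++ [line], false)

def pvBstep (hs : List String) (nbG : List Int) (acc : List String × Int) (p : Int × String) :
    List String × Int :=
  if (if PySem.Set.contains hs (PySem.Str.strip p.2) then max acc.2 (PySem.List.pyGetD nbG p.1 0) else acc.2) ≤ p.1 then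
    (acc.1 ++ [p.2], if PySem.Set.contains hs (PySem.Str.strip p.2) then max acc.2 (PySem.List.pyGetD nbG p.1 0) else acc.2)
  else (acc.1, if PySem.Set.contains hs (PySem.Str.strip p.2) then max acc.2 (PySem.List.pyGetD nbG p.1 0) else acc.2)

theorem portA_eq (lines hs : List String) :
    strip_refiner_appendix_blocks_py lines hs = (lines.foldl (pvAstep hs) ([], false)).1 := rfl

theorem portB_eq (lines hs : List String) :
    strip_refiner_appendix_blocks_py_alt lines hs =
      ((PySem.List.enumerate lines 0).foldl
        (pvBstep hs (pvNbFold lines 0 (lines.length : Int)).1) ([], 0)).1 := rfl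

-- next boundary at-or-after index i inside todo, or n (proof-side characterisation)
def pvNxtB : List String → Int → Int → Int
  | [], _, n => n
  | l :: r, i, n => if pvIsBoundary l then i else pvNxtB r (i + 1) n

theorem pvNbFold_snd (todo : List String) (i n : Int) :
    (pvNbFold todo i n).2 = pvNxtB todo i n := by
  induction todo generalizing i with
  | nil => rfl
  | cons l r ih => simp [pvNbFold, pvNxtB, ih]

theorem pvNbFold_fst_cons (l : String) (r : List String) (i n : Int) :
    (pvNbFold (l :: r) i n).1 = pvNxtB r (i + 1) n :: (pvNbFold r (i + 1) n).1 := by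
  simp [pvNbFold, pvNbFold_snd]

theorem pvNxtB_lb (todo : List String) (i : Int) :
    i ≤ pvNxtB todo i (i + todo.length) := by
  induction todo generalizing i with
  | nil => simp [pvNxtB]
  | cons l r ih =>
    simp only [pvNxtB]
    split
    · omega
    · have h := ih (i + 1)
      have he : (i : Int) + (l :: r).length = (i + 1) + r.length := by
        simp [List.length_cons]; omega
      rw [he]
      omega

-- A's step, evaluated in the three relevant situations
theorem pvAstep_skip (hs : List String) (out : List String) (l : String)
    (hB : pvIsBoundary l = false) :
    pvAstep hs (out, true) l = (out, true) := by
  have hb : (PySem.Str.startswith (PySem.Str.strip l) "### " ||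
             PySem.Str.startswith (PySem.Str.strip l) "## ") = false := by
    simpa [pvIsBoundary] using hB
  simp only [pvAstep]
  rw [hb]
  rfl

theorem pvAstep_fall (hs : List String) (out : List String) (l : String) (skipping : Bool)
    (h : skipping = false ∨ pvIsBoundary l = true) :
    pvAstep hs (out, skipping) l =
      (if PySem.Set.contains hs (PySem.Str.strip l) then (out, true) else (out ++ [l], false)) := by
  rcases h with h | h
  · subst h
    simp only [pvAstep, Bool.false_and]
    rfl
  · have hb : (PySem.Str.startswith (PySem.Str.strip l) "### " ||
               PySem.Str.startswith (PySem.Str.strip l) "## ") = true := by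
      simpa [pvIsBoundary] using h
    simp only [pvAstep]
    rw [hb]
    cases skipping <;> rfl

-- B's step, evaluated
theorem pvBstep_eval (hs : List String) (nbG : List Int) (out : List String) (cover i : Int)
    (l : String) (c' : Int)
    (hc : (if PySem.Set.contains hs (PySem.Str.strip l) then
             max cover (PySem.List.pyGetD nbG i 0) else cover) = c') :
    pvBstep hs nbG (out, cover) (i, l) =
      (if c' ≤ i then (out ++ [l], c') else (out, c')) := by
  simp only [pvBstep]
  rw [hc]

-- the main invariant: A's fold over the remaining lines equals B's pass-2 fold
theorem pvMain (hs : List String) (nbG : List Int) :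
    ∀ (todo : List String) (i : Nat) (out : List String) (skipping : Bool) (cover : Int)
      (n : Int),
      n = (i : Int) + todo.length →
      List.drop i nbG = (pvNbFold todo i n).1 →
      skipping = decide (max (i : Int) 1 ≤ cover) →
      (skipping = true → cover = pvNxtB todo i n) →
      (skipping = false → cover ≤ (i : Int)) →
      0 ≤ cover →
      (todo.foldl (pvAstep hs) (out, skipping)).1 =
      ((PySem.List.enumerate todo (i : Int)).foldl (pvBstep hs nbG) (out, cover)).1 := by
  intro todo
  induction todo with
  | nil =>
    intro i out skipping cover n _ _ _ _ _ _
    simp [PySem.List.enumerate]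
  | cons l r ih =>
    intro i out skipping cover n Hn Hnb Hskip Hcov Hle Hpos
    -- facts about nbG at index i
    have hcons : List.drop i nbG = pvNxtB r ((i : Int) + 1) n :: (pvNbFold r ((i : Int) + 1) n).1 := by
      rw [Hnb, pvNbFold_fst_cons]
    have hlen : i < nbG.length := by
      have h1 : (List.drop i nbG).length = nbG.length - i := List.length_drop ..
      rw [hcons] at h1
      simp at h1
      omega
    have hget : PySem.List.pyGetD nbG (i : Int) 0 = pvNxtB r ((i : Int) + 1) n := by
      have h0 : nbG[i]? = some (pvNxtB r ((i : Int) + 1) n) := by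
        have h1 : nbG[i + 0]? = (List.drop i nbG)[0]? := (List.getElem?_drop ..).symm
        rw [hcons] at h1
        simpa using h1
      simp [List.getD_eq_getElem?_getD, h0]
    have hdrop' : List.drop (i + 1) nbG = (pvNbFold r ((i : Int) + 1) n).1 := by
      have h1 : List.drop (i + 1) nbG = (List.drop i nbG).tail := by
        rw [← List.drop_drop]
        simp
      rw [h1, hcons]
      rfl
    have Hn' : n = ((i + 1 : Nat) : Int) + r.length := by
      rw [Hn]
      simp [List.length_cons]
      omega
    have hnxtlb : ((i : Int) + 1) ≤ pvNxtB r ((i : Int) + 1) n := by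
      have h2 := pvNxtB_lb r ((i : Int) + 1)
      have he : ((i : Int) + 1) + (r.length : Int) = n := by
        rw [Hn]; simp [List.length_cons]; omega
      rw [he] at h2
      exact h2
    have hcast : ((i + 1 : Nat) : Int) = (i : Int) + 1 := by push_cast; ring
    -- unfold one step of both folds
    rw [PySem.List.enumerate_cons, List.foldl_cons, List.foldl_cons]
    by_cases hH : PySem.Set.contains hs (PySem.Str.strip l)
    · -- refiner heading: both sides drop the line; B's cover jumps to the next boundary
      have hcov' : (if PySem.Set.contains hs (PySem.Str.strip l) then
              max cover (PySem.List.pyGetD nbG (i : Int) 0) else cover)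
            = pvNxtB r ((i : Int) + 1) n := by
        rw [if_pos hH, hget]
        cases hsv : skipping with
        | false => have h1 := Hle hsv; omega
        | true =>
          have h2 := Hcov hsv
          simp only [pvNxtB] at h2
          split at h2 <;> omega
      rw [pvBstep_eval hs nbG out cover (i : Int) l _ hcov']
      rw [if_neg (by omega : ¬ (pvNxtB r ((i : Int) + 1) n ≤ (i : Int)))]
      have hA : pvAstep hs (out, skipping) l = (out, true) := by
        cases hsv : skipping with
        | false => rw [pvAstep_fall hs out l false (Or.inl rfl), if_pos hH]
        | true =>
          cases hBv : pvIsBoundary l with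
          | false => exact pvAstep_skip hs out l hBv
          | true => rw [pvAstep_fall hs out l true (Or.inr hBv), if_pos hH]
      rw [hA]
      have hmain := ih (i + 1) out true (pvNxtB r ((i : Int) + 1) n) n Hn'
        (by rw [hcast]; exact hdrop')
        (by rw [hcast]; simp; omega)
        (fun _ => by rw [hcast])
        (by simp)
        (by omega)
      rw [hcast] at hmain
      exact hmain
    · -- not a heading: B's cover is unchanged
      have hcov' : (if PySem.Set.contains hs (PySem.Str.strip l) then
              max cover (PySem.List.pyGetD nbG (i : Int) 0) else cover) = cover :=
        if_neg hH
      rw [pvBstep_eval hs nbG out cover (i : Int) l _ hcov']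
      cases hsv : skipping with
      | false =>
        -- not skipping: both sides keep the line
        have h1 := Hle hsv
        rw [if_pos h1, pvAstep_fall hs out l false (Or.inl rfl), if_neg hH]
        have hmain := ih (i + 1) (out ++ [l]) false cover n Hn'
          (by rw [hcast]; exact hdrop')
          (by rw [hcast]; rw [hsv] at Hskip; simp at Hskip ⊢; omega)
          (by intro h; cases h)
          (fun _ => by rw [hcast]; omega)
          Hpos
        rw [hcast] at hmain
        exact hmain
      | true =>
        have h2 := Hcov hsv
        simp only [pvNxtB] at h2
        cases hBv : pvIsBoundary l with
        | true =>
          -- boundary ends the block; the line is kept by both sides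
          rw [hBv] at h2
          simp only [if_true] at h2
          rw [if_pos (by omega : cover ≤ (i : Int))]
          rw [pvAstep_fall hs out l true (Or.inr hBv), if_neg hH]
          have hmain := ih (i + 1) (out ++ [l]) false cover n Hn'
            (by rw [hcast]; exact hdrop')
            (by rw [hcast]; simp; omega)
            (by intro h; cases h)
            (fun _ => by rw [hcast]; omega)
            Hpos
          rw [hcast] at hmain
          exact hmain
        | false =>
          -- still inside the block: both sides drop the line
          rw [hBv] at h2
          simp only [Bool.false_eq_true, if_false] at h2
          rw [if_neg (by omega : ¬ (cover ≤ (i : Int)))]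
          rw [pvAstep_skip hs out l hBv]
          have hmain := ih (i + 1) out true cover n Hn'
            (by rw [hcast]; exact hdrop')
            (by rw [hcast]; simp; omega)
            (fun _ => by rw [hcast]; exact h2)
            (by intro h; cases h)
            Hpos
          rw [hcast] at hmain
          exact hmain

-- ===== VERDICT (by name: the statement is the Claim_ definition above) =====
theorem strip_refiner_appendix_blocks_py_spec : Claim_equal_strip_refiner_appendix_blocks_py := by
  intro lines hs _
  unfold Spec_strip_refiner_appendix_blocks_py
  rw [portA_eq, portB_eq]
  have hmain := pvMain hs (pvNbFold lines 0 (lines.length : Int)).1 lines 0 [] false 0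
    (lines.length : Int)
    (by simp)
    (by simp)
    (by simp)
    (by intro h; cases h)
    (by intro _; simp)
    le_rfl
  simpa using hmain
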